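-- pv_equiv track=rewrite | github.com/RavinderSinghPB/data-structure-and-algorithm | string/lexicographically smallest and largest string.py | orderString
-- ===== SOURCE A (Python) =====
-- def orderString(s):
--     min_i = 0
--     max_i = 0
--
--     for i in range(1, len(s)):
--         if s[min_i] > s[i]:
--             min_i = i
--         elif s[max_i] < s[i]:
--             max_i = i
--
--     return s[min_i], s[max_i]
-- ===== SOURCE B (Python) =====
-- def orderString(s):
--     lo = s[0]
--     hi = s[0]
--     for ch in s:
--         if ch < lo:
--             lo = ch
--     for ch in s:
--         if ch > hi:
--             hi = ch
--     return lo, hi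
-- ===== Notes on version B (the rewrite author's own statement) =====
-- stated objective: simpler
-- what changed: Replaces A's single index-based pass with elif-coupled min/max index tracking by two independent value-based scans (one for the smallest char, one for the largest), with no index bookkeeping.
import Mathlib
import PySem

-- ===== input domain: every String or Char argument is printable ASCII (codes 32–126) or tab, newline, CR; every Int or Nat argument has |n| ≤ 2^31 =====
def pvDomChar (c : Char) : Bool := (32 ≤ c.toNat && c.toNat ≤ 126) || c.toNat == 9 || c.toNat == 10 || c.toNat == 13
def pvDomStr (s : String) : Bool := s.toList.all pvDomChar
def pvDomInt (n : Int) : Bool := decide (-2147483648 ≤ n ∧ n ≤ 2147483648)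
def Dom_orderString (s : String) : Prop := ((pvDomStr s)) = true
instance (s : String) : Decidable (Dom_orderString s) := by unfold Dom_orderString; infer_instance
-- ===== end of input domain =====

-- B computes the smallest and largest character by two independent value-based scans from s[0],
-- instead of A's single index-tracking pass with elif-coupled branches (objective: simpler).
-- Pre_ excludes the empty string, on which both Pythons raise IndexError (s[0]).


-- ===== PORT A =====
-- one step of A's loop body: state is (min_i, max_i), i the current index
def stepA (cs : List Char) (st : Int × Int) (i : Int) : Int × Int :=
  if cs.getD st.1.toNat ' ' > cs.getD i.toNat ' ' then (i, st.2)
  else if cs.getD st.2.toNat ' ' < cs.getD i.toNat ' ' then (st.1, i)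
  else st

def orderString (s : String) : String × String :=
  let cs := s.toList
  let st := (PySem.List.pyRange 1 cs.length 1).foldl (stepA cs) ((0 : Int), (0 : Int))
  (String.ofList [cs.getD st.1.toNat ' '], String.ofList [cs.getD st.2.toNat ' '])

-- ===== PORT B =====
def orderString_alt (s : String) : String × String :=
  match s.toList with
  | [] => ("", "")   -- unreachable under Pre_ (Python B raises IndexError on s[0])
  | c :: _ =>
    let lo := s.toList.foldl (fun lo ch => if ch < lo then ch else lo) c
    let hi := s.toList.foldl (fun hi ch => if ch > hi then ch else hi) c
    (String.ofList [lo], String.ofList [hi])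

-- ===== PRECONDITION & SPEC =====
-- Pre_ excludes only the empty string, on which A raises IndexError.
def Pre_orderString (s : String) : Prop := s ≠ ""
instance (s : String) : Decidable (Pre_orderString s) := by unfold Pre_orderString; infer_instance
def pvWitness_orderString : String := "ba"

def Spec_orderString (s : String) (out : String × String) : Prop := out = orderString_alt s
instance (s : String) (out : String × String) : Decidable (Spec_orderString s out) := by unfold Spec_orderString; infer_instance

-- ===== CLAIM (what is proved, stated in full; the proofs are below) =====
def Claim_equal_orderString : Prop := ∀ (s : String), Dom_orderString s → Pre_orderString s → Spec_orderString s (orderString s)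

-- ===== LEMMAS AND PROOFS =====
def myMin (a b : Char) : Char := if b < a then b else a
def myMax (a b : Char) : Char := if b > a then b else a

theorem foldl_myMin_append (l : List Char) (c x : Char) :
    (l ++ [x]).foldl (fun lo ch => if ch < lo then ch else lo) c
      = myMin (l.foldl (fun lo ch => if ch < lo then ch else lo) c) x := by
  simp [List.foldl_append, myMin]

theorem foldl_myMax_append (l : List Char) (c x : Char) :
    (l ++ [x]).foldl (fun hi ch => if ch > hi then ch else hi) c
      = myMax (l.foldl (fun hi ch => if ch > hi then ch else hi) c) x := by
  simp [List.foldl_append, myMax]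

-- the min/max of a prefix, B-style
def fmin (c : Char) (l : List Char) (n : Nat) : Char :=
  ((c :: l).take n).foldl (fun lo ch => if ch < lo then ch else lo) c
def fmax (c : Char) (l : List Char) (n : Nat) : Char :=
  ((c :: l).take n).foldl (fun hi ch => if ch > hi then ch else hi) c

-- main invariant of A's loop
theorem loopA_inv (c : Char) (l : List Char) (n : Nat) (h1 : 1 ≤ n) (h2 : n ≤ (c :: l).length) :
    ((c :: l).getD ((PySem.List.pyRange 1 (n : Int) 1).foldl (stepA (c :: l)) ((0 : Int), (0 : Int))).1.toNat ' ' = fmin c l n) ∧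
    ((c :: l).getD ((PySem.List.pyRange 1 (n : Int) 1).foldl (stepA (c :: l)) ((0 : Int), (0 : Int))).2.toNat ' ' = fmax c l n) ∧
      fmin c l n ≤ fmax c l n := by
  induction n with
  | zero => omega
  | succ m ih =>
    by_cases hm : 1 ≤ m
    · have hm2 : m ≤ (c :: l).length := by omega
      obtain ⟨e1, e2, e3⟩ := ih hm hm2
      have hr : PySem.List.pyRange 1 ((m : Int) + 1) 1
          = PySem.List.pyRange 1 (m : Int) 1 ++ [(m : Int)] :=
        PySem.List.pyRange_one_succ_right (by omega)
      have hcast : ((m + 1 : Nat) : Int) = (m : Int) + 1 := by push_cast; ring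
      have hlt : m < (c :: l).length := by omega
      have htk : (c :: l).take (m + 1) = (c :: l).take m ++ [(c :: l).getD m ' '] := by
        rw [List.take_succ]
        congr 1
        simp [List.getElem?_eq_getElem hlt, List.getD]  -- getD m = the m-th char
      set x := (c :: l).getD m ' ' with hx
      have hmin1 : fmin c l (m + 1) = myMin (fmin c l m) x := by
        rw [fmin, htk, foldl_myMin_append, fmin]
      have hmax1 : fmax c l (m + 1) = myMax (fmax c l m) x := by
        rw [fmax, htk, foldl_myMax_append, fmax]
      rw [hcast, hr, List.foldl_append]
      simp only [List.foldl_cons, List.foldl_nil]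
      set st := (PySem.List.pyRange 1 (m : Int) 1).foldl (stepA (c :: l)) ((0 : Int), (0 : Int)) with hst
      have hxg : (c :: l).getD (Int.toNat (m : Int)) ' ' = x := by simp [hx]
      unfold stepA
      by_cases hb1 : (c :: l).getD st.1.toNat ' ' > (c :: l).getD ((m : Int)).toNat ' '
      · -- min updates
        rw [if_pos hb1]
        rw [hxg] at hb1; rw [e1] at hb1
        have hx_min : myMin (fmin c l m) x = x := by simp [myMin, hb1]
        have hx_max : myMax (fmax c l m) x = fmax c l m := by
          have : ¬ x > fmax c l m := not_lt.mpr (le_of_lt (lt_of_lt_of_le hb1 e3))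
          simp [myMax, this]
        refine ⟨?_, ?_, ?_⟩
        · rw [hmin1, hx_min]; exact hxg
        · rw [hmax1, hx_max]; exact e2
        · rw [hmin1, hmax1, hx_min, hx_max]
          exact le_of_lt (lt_of_lt_of_le hb1 e3)
      · rw [if_neg hb1]
        rw [hxg] at hb1; rw [e1] at hb1
        have hx_min : myMin (fmin c l m) x = fmin c l m := by simp [myMin, hb1]
        by_cases hb2 : (c :: l).getD st.2.toNat ' ' < (c :: l).getD ((m : Int)).toNat ' '
        · -- max updates
          rw [if_pos hb2]
          rw [hxg] at hb2; rw [e2] at hb2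
          have hx_max : myMax (fmax c l m) x = x := by simp [myMax, hb2]
          refine ⟨?_, ?_, ?_⟩
          · rw [hmin1, hx_min]; exact e1
          · rw [hmax1, hx_max]; exact hxg
          · rw [hmin1, hmax1, hx_min, hx_max]
            exact not_lt.mp hb1
        · rw [if_neg hb2]
          rw [hxg] at hb2; rw [e2] at hb2
          have hx_max : myMax (fmax c l m) x = fmax c l m := by simp [myMax, hb2]
          exact ⟨by rw [hmin1, hx_min]; exact e1, by rw [hmax1, hx_max]; exact e2,
            by rw [hmin1, hmax1, hx_min, hx_max]; exact e3⟩
    · -- m = 0, n = 1: loop is empty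
      have hm0 : m = 0 := by omega
      subst hm0
      simp [PySem.List.pyRange_one_eq_nil (by norm_num : (1:Int) ≤ 1), fmin, fmax, List.getD]

-- ===== VERDICT (by name: the statement is the Claim_ definition above) =====
theorem orderString_spec : Claim_equal_orderString := by
  intro s _ hpre
  unfold Spec_orderString orderString orderString_alt
  have hne : s.toList ≠ [] := by
    intro h
    have h2 := congrArg String.ofList h
    rw [String.ofList_toList] at h2
    exact hpre h2
  obtain ⟨c, l, hcl⟩ : ∃ c l, s.toList = c :: l := by
    cases hct : s.toList with
    | nil => exact absurd hct hne
    | cons c l => exact ⟨c, l, rfl⟩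
  rw [hcl]
  have h := loopA_inv c l (c :: l).length (by simp) (le_refl _)
  simp only at h
  obtain ⟨e1, e2, _⟩ := h
  have htk : (c :: l).take (c :: l).length = c :: l := List.take_length
  simp only [fmin, fmax, htk] at e1 e2
  simp only [e1, e2, List.foldl_cons]
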